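-- pv_equiv track=rewrite | github.com/pookaPlay/ohm | src/python_byte_sim/ohm/DataIO.py | DeserializeMSBOffset
-- ===== SOURCE A (Python) =====
-- def DeserializeMSBOffset(data):
--     input = data.copy()
--     NBits= len(input)
--     offset = 2**(NBits-1)
--
--     thresholds = [2**i for i in range(NBits)]
--     thresholds.reverse()
--
--     result = sum([input[i] * thresholds[i] for i in range(NBits)])
--     result -= offset
--
--     return(result)
-- ===== SOURCE B (Python) =====
-- def DeserializeMSBOffset(data):
--     result = 0
--     for b in data:
--         result = result * 2 + b
--     return result - 2**(len(data)-1)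
-- ===== Notes on version B (the rewrite author's own statement) =====
-- stated objective: simpler
-- what changed: Replaces the reversed power-of-two thresholds table and the index-parallel sum comprehension by a single Horner accumulator (result = result*2 + bit), avoiding building the big-integer power table and the intermediate product list.
-- outside the precondition, e.g. on DeserializeMSBOffset([]): A returns -0.5, B returns -0.5
import Mathlib
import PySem

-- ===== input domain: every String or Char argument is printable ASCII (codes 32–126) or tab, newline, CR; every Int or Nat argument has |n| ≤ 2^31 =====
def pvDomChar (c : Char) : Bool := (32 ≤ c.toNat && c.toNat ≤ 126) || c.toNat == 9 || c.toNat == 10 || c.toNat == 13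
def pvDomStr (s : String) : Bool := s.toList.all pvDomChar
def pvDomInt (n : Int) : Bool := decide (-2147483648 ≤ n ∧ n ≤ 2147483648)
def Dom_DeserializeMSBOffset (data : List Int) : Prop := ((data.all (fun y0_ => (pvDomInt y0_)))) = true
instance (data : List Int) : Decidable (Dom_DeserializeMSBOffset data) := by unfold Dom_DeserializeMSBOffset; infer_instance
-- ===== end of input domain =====

-- B replaces A's reversed power-of-two table and index-parallel sum by a single Horner accumulator (simpler).

-- ===== PORT A =====
-- thresholds = [2**i for i in range(NBits)]; thresholds.reverse();
-- result = sum(input[i] * thresholds[i] for i in range(NBits)); result -= 2**(NBits-1)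
def DeserializeMSBOffset (data : List Int) : Int :=
  let NBits := data.length
  let offset : Int := 2 ^ (NBits - 1)
  let thresholds := ((List.range NBits).map (fun i => (2 : Int) ^ i)).reverse
  let result := ((List.range NBits).map (fun i => data.getD i 0 * thresholds.getD i 0)).sum
  result - offset

-- ===== PORT B =====
def DeserializeMSBOffset_alt (data : List Int) : Int :=
  data.foldl (fun result b => result * 2 + b) 0 - 2 ^ (data.length - 1)

-- ===== PRECONDITION & SPEC =====
-- Pre_ excludes only the empty list, on which the Python computes offset = 2**(-1) = 0.5
-- and returns the float -0.5, not a value of the declared Int type.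
def Pre_DeserializeMSBOffset (data : List Int) : Prop := data ≠ []
instance (data : List Int) : Decidable (Pre_DeserializeMSBOffset data) := by unfold Pre_DeserializeMSBOffset; infer_instance
def pvWitness_DeserializeMSBOffset : List Int := [1, 0, 1]

def Spec_DeserializeMSBOffset (data : List Int) (out : Int) : Prop := out = DeserializeMSBOffset_alt data
instance (data : List Int) (out : Int) : Decidable (Spec_DeserializeMSBOffset data out) := by unfold Spec_DeserializeMSBOffset; infer_instance

-- ===== CLAIM (what is proved, stated in full; the proofs are below) =====
def Claim_equal_DeserializeMSBOffset : Prop := ∀ (data : List Int), Dom_DeserializeMSBOffset data → Pre_DeserializeMSBOffset data → Spec_DeserializeMSBOffset data (DeserializeMSBOffset data)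

-- ===== LEMMAS AND PROOFS =====

-- shifting the Horner accumulator
theorem horner_foldl_shift (l : List Int) (a : Int) :
    l.foldl (fun r b => r * 2 + b) a = a * 2 ^ l.length + l.foldl (fun r b => r * 2 + b) 0 := by
  induction l generalizing a with
  | nil => simp
  | cons x xs ih =>
    simp only [List.foldl_cons, List.length_cons]
    rw [ih (a * 2 + x), ih (0 * 2 + x)]
    ring

-- the reversed thresholds table, pointwise
theorem thresholds_getD (n i : Nat) (hi : i < n) :
    (((List.range n).map (fun j => (2 : Int) ^ j)).reverse).getD i 0 = 2 ^ (n - 1 - i) := by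
  have hlen : (((List.range n).map (fun j => (2 : Int) ^ j)).reverse).length = n := by simp
  rw [List.getD_eq_getElem _ _ (by omega : i < _)]
  rw [List.getElem_reverse]
  simp only [List.getElem_map, List.getElem_range, List.length_map, List.length_range]

-- A's weighted sum equals B's Horner fold
theorem sum_eq_horner (data : List Int) :
    ((List.range data.length).map
      (fun i => data.getD i 0 *
        (((List.range data.length).map (fun j => (2 : Int) ^ j)).reverse).getD i 0)).sum
      = data.foldl (fun r b => r * 2 + b) 0 := by
  have key : ∀ (l : List Int),
      ((List.range l.length).map (fun i => l.getD i 0 * (2 : Int) ^ (l.length - 1 - i))).sum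
        = l.foldl (fun r b => r * 2 + b) 0 := by
    intro l
    induction l with
    | nil => simp
    | cons x xs ih =>
      rw [List.foldl_cons, horner_foldl_shift]
      simp only [List.length_cons, List.range_succ_eq_map, List.map_cons, List.map_map,
        List.sum_cons]
      have h0 : (x :: xs).getD 0 0 * (2 : Int) ^ (xs.length + 1 - 1 - 0) = x * 2 ^ xs.length := by
        simp
      rw [h0]
      congr 1
      · ring
      · rw [← ih]
        congr 1
        apply List.map_congr_left
        intro i hi
        simp only [Function.comp_apply, List.getD_cons_succ]
        congr 2
        omega
  calc ((List.range data.length).map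
      (fun i => data.getD i 0 *
        (((List.range data.length).map (fun j => (2 : Int) ^ j)).reverse).getD i 0)).sum
      = ((List.range data.length).map
          (fun i => data.getD i 0 * (2 : Int) ^ (data.length - 1 - i))).sum := by
        congr 1
        apply List.map_congr_left
        intro i hi
        rw [thresholds_getD data.length i (List.mem_range.mp hi)]
    _ = data.foldl (fun r b => r * 2 + b) 0 := key data

-- ===== VERDICT (by name: the statement is the Claim_ definition above) =====
theorem DeserializeMSBOffset_spec : Claim_equal_DeserializeMSBOffset := by
  intro data _ _
  unfold Spec_DeserializeMSBOffset DeserializeMSBOffset DeserializeMSBOffset_alt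
  simp only
  rw [sum_eq_horner]
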